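-- pv_equiv track=rewrite | github.com/nd-cse-30872-su25/contest-edward | challengeB/program.py | iso
-- ===== SOURCE A (Python) =====
-- def iso(word1: str, word2: str)->bool:
--     if len(word1) != len(word2):
--         return False
--     letters = {}
--     for index, letter in enumerate(word1):
--         if letter not in letters:
--             letters[letter] = word2[index]
--         else:
--             if letters[letter] != word2[index]:
--                 return False
--     return True
-- ===== SOURCE B (Python) =====
-- def iso(word1: str, word2: str) -> bool:
--     if len(word1) != len(word2):
--         return False
--     return len(set(zip(word1, word2))) == len(set(word1))
-- ===== Notes on version B (the rewrite author's own statement) =====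
-- stated objective: simpler
-- what changed: Replaced the stateful letter-to-letter dict loop with early exit by an aggregate cardinality test: after the length guard, the mapping is consistent iff the number of distinct (c1,c2) pairs equals the number of distinct word1 letters.
import Mathlib
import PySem

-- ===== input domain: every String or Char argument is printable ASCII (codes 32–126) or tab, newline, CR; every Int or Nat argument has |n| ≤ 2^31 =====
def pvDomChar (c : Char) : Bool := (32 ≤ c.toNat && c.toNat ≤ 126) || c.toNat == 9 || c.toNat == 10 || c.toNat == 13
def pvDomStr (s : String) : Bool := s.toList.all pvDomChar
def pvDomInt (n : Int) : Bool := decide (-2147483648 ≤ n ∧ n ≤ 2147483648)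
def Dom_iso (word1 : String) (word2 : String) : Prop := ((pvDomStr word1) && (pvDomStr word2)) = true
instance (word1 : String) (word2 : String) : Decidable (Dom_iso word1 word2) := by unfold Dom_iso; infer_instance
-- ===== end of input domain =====

-- B replaces A's stateful dict loop with an aggregate set-cardinality test (simpler, same cost).

-- ===== PORT A =====
-- the 'for index, letter in enumerate(word1)' loop: dict `letters`, early exit on mismatch
def isoLoopA (w2 : List Char) : List (Int × Char) → PySem.Dict Char Char → Bool
  | [], _ => true
  | (index, letter) :: rest, letters =>
    match PySem.List.pyGet? w2 index with   -- word2[index]; in range after the length guard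
    | none => false
    | some c2 =>
      if (letters.contains letter) = false then
        isoLoopA w2 rest (letters.insert letter c2)
      else
        if letters.getD letter c2 ≠ c2 then false
        else isoLoopA w2 rest letters

def iso (word1 : String) (word2 : String) : Bool :=
  if PySem.Str.len word1 ≠ PySem.Str.len word2 then false
  else isoLoopA word2.toList (PySem.List.enumerate word1.toList 0) PySem.Dict.empty

-- ===== PORT B =====
def iso_alt (word1 : String) (word2 : String) : Bool :=
  if PySem.Str.len word1 ≠ PySem.Str.len word2 then false
  else (PySem.Set.ofList (word1.toList.zip word2.toList)).length
         = (PySem.Set.ofList word1.toList).length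

-- ===== PRECONDITION & SPEC =====
def Spec_iso (word1 : String) (word2 : String) (out : Bool) : Prop := out = iso_alt word1 word2
instance (word1 : String) (word2 : String) (out : Bool) : Decidable (Spec_iso word1 word2 out) := by unfold Spec_iso; infer_instance

-- ===== CLAIM (what is proved, stated in full; the proofs are below) =====
def Claim_equal_iso : Prop := ∀ (word1 : String) (word2 : String), Dom_iso word1 word2 → Spec_iso word1 word2 (iso word1 word2)

-- ===== LEMMAS AND PROOFS =====

-- the A-loop expressed on the zipped lists (proof-side restatement of isoLoopA)
def loopZip : PySem.Dict Char Char → List (Char × Char) → Bool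
  | _, [] => true
  | d, (c1, c2) :: rest =>
    match d.get? c1 with
    | none => loopZip (d.insert c1 c2) rest
    | some v => if v = c2 then loopZip d rest else false

def Consistent (L : List (Char × Char)) : Prop :=
  ∀ p ∈ L, ∀ q ∈ L, p.1 = q.1 → p.2 = q.2

lemma isoLoopA_eq_loopZip (l1 w2 : List Char) (k : Nat) (d : PySem.Dict Char Char)
    (h : k + l1.length ≤ w2.length) :
    isoLoopA w2 (PySem.List.enumerate l1 (k : Int)) d = loopZip d (l1.zip (w2.drop k)) := by
  induction l1 generalizing k d with
  | nil => simp [PySem.List.enumerate_nil, isoLoopA, loopZip]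
  | cons c rest ih =>
    have hk : k < w2.length := by simp at h; omega
    have hrest : k + 1 + rest.length ≤ w2.length := by simp at h; omega
    have hdrop : w2.drop k = w2[k] :: w2.drop (k + 1) := List.drop_eq_getElem_cons hk
    rw [PySem.List.enumerate_cons, hdrop, List.zip_cons_cons]
    have hrec : ((k : Int) + 1) = ((k + 1 : Nat) : Int) := by push_cast; ring
    simp only [isoLoopA, loopZip, PySem.List.pyGet?_natCast, List.getElem?_eq_getElem hk, hrec]
    rcases hget : d.get? c with _ | v
    · have hc : d.contains c = false := by
        rw [PySem.Dict.contains_eq_isSome_get?, hget]; rfl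
      simpa [hc] using ih (k + 1) (d.insert c w2[k]) hrest
    · have hc : d.contains c = true := by
        rw [PySem.Dict.contains_eq_isSome_get?, hget]; rfl
      have hgd : d.getD c w2[k] = v := PySem.Dict.getD_of_get?_eq_some d _ hget
      by_cases hv : v = w2[k]
      · simpa [hc, hgd, hv] using ih (k + 1) d hrest
      · simp [hc, hgd, hv]

lemma loopZip_iff (L : List (Char × Char)) (d : PySem.Dict Char Char) :
    loopZip d L = true ↔
      Consistent L ∧ (∀ p ∈ L, ∀ v, d.get? p.1 = some v → p.2 = v) := by
  induction L generalizing d with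
  | nil => simp [loopZip, Consistent]
  | cons hd rest ih =>
    obtain ⟨c1, c2⟩ := hd
    rcases hget : d.get? c1 with _ | v
    · simp only [loopZip, hget, ih]
      constructor
      · rintro ⟨hcons, hd2⟩
        refine ⟨?_, ?_⟩
        · rintro p hp q hq hpq
          rcases List.mem_cons.mp hp with rfl | hp <;>
            rcases List.mem_cons.mp hq with rfl | hq
          · rfl
          · exact (hd2 q hq c2
              (by rw [show q.1 = c1 from hpq.symm]; exact PySem.Dict.get?_insert_self d c1 c2)).symm
          · exact hd2 p hp c2
              (by rw [show p.1 = c1 from hpq]; exact PySem.Dict.get?_insert_self d c1 c2)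
          · exact hcons p hp q hq hpq
        · rintro p hp v hv
          rcases List.mem_cons.mp hp with rfl | hp
          · simp only at hv; rw [hget] at hv; cases hv
          · by_cases hc : p.1 = c1
            · rw [hc, hget] at hv; cases hv
            · exact hd2 p hp v (by rw [PySem.Dict.get?_insert_of_ne d c2 hc]; exact hv)
      · rintro ⟨hcons, hd2⟩
        refine ⟨?_, ?_⟩
        · intro p hp q hq hpq
          exact hcons p (List.mem_cons_of_mem _ hp) q (List.mem_cons_of_mem _ hq) hpq
        · rintro p hp v hv
          by_cases hc : p.1 = c1
          · rw [hc, PySem.Dict.get?_insert_self] at hv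
            injection hv with h
            subst h
            exact hcons p (List.mem_cons_of_mem _ hp) (c1, c2) List.mem_cons_self hc
          · rw [PySem.Dict.get?_insert_of_ne d c2 hc] at hv
            exact hd2 p (List.mem_cons_of_mem _ hp) v hv
    · simp only [loopZip, hget]
      by_cases hv : v = c2
      · subst hv
        rw [if_pos rfl, ih]
        constructor
        · rintro ⟨hcons, hd2⟩
          refine ⟨?_, ?_⟩
          · rintro p hp q hq hpq
            rcases List.mem_cons.mp hp with rfl | hp <;>
              rcases List.mem_cons.mp hq with rfl | hq
            · rfl
            · exact (hd2 q hq v (by rw [show q.1 = c1 from hpq.symm]; exact hget)).symm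
            · exact hd2 p hp v (by rw [show p.1 = c1 from hpq]; exact hget)
            · exact hcons p hp q hq hpq
          · rintro p hp w hw
            rcases List.mem_cons.mp hp with rfl | hp
            · have h := (show d.get? c1 = some w from hw).symm.trans hget
              injection h with h2
              exact h2.symm
            · exact hd2 p hp w hw
        · rintro ⟨hcons, hd2⟩
          exact ⟨fun p hp q hq hpq =>
              hcons p (List.mem_cons_of_mem _ hp) q (List.mem_cons_of_mem _ hq) hpq,
            fun p hp w hw => hd2 p (List.mem_cons_of_mem _ hp) w hw⟩
      · rw [if_neg hv]
        refine iff_of_false (by simp) ?_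
        rintro ⟨_, hd2⟩
        exact hv (hd2 (c1, c2) List.mem_cons_self v hget).symm

-- |set L| for a PySem set is the Finset cardinality of L's elements
lemma set_ofList_length {α : Type} [BEq α] [LawfulBEq α] [DecidableEq α] (xs : List α) :
    (PySem.Set.ofList xs).length = xs.toFinset.card := by
  rw [← PySem.List.dedup_eq_ofList]
  have hnd : (PySem.List.dedup xs).Nodup := PySem.List.nodup_dedup xs
  have hfs : (PySem.List.dedup xs).toFinset = xs.toFinset := by
    ext x; simp only [List.mem_toFinset]; exact PySem.List.mem_dedup xs x
  rw [← hfs, List.toFinset_card_of_nodup hnd]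

lemma card_eq_iff_consistent (l1 l2 : List Char) (hlen : l1.length = l2.length) :
    (l1.zip l2).toFinset.card = l1.toFinset.card ↔ Consistent (l1.zip l2) := by
  have hmap : (l1.zip l2).map Prod.fst = l1 := List.map_fst_zip (le_of_eq hlen)
  have himg : (l1.zip l2).toFinset.image Prod.fst = l1.toFinset := by
    conv_rhs => rw [← hmap]
    ext x; simp
  rw [← himg]
  rw [eq_comm, Finset.card_image_iff]
  constructor
  · intro hinj p hp q hq hpq
    have := hinj (List.mem_toFinset.mpr hp) (List.mem_toFinset.mpr hq) hpq
    rw [this]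
  · intro hcons p hp q hq hpq
    have h2 := hcons p (List.mem_toFinset.mp hp) q (List.mem_toFinset.mp hq) hpq
    exact Prod.ext hpq h2

-- ===== VERDICT (by name: the statement is the Claim_ definition above) =====
theorem iso_spec : Claim_equal_iso := by
  intro word1 word2 _
  unfold Spec_iso iso iso_alt
  by_cases hlen : PySem.Str.len word1 ≠ PySem.Str.len word2
  · rw [if_pos hlen, if_pos hlen]
  · rw [if_neg hlen, if_neg hlen]
    have hl : word1.toList.length = word2.toList.length := by
      simp only [PySem.Str.len, ne_eq, not_not] at hlen
      omega
    have hA := isoLoopA_eq_loopZip word1.toList word2.toList 0 PySem.Dict.empty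
      (by omega)
    simp only [Nat.cast_zero, List.drop_zero] at hA
    rw [hA]
    rw [Bool.eq_iff_iff, loopZip_iff]
    simp only [PySem.Dict.get?_empty, reduceCtorEq, false_implies, implies_true, and_true,
      decide_eq_true_eq]
    rw [set_ofList_length, set_ofList_length]
    exact (card_eq_iff_consistent _ _ hl).symm
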